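-- pv_equiv track=rewrite | github.com/UW-Madison-Lee-Lab/ENTP | rasp/match3.py | causal_match3_true
-- ===== SOURCE A (Python) =====
-- M = 99
--
-- def causal_match3_true(x):
--     n = len(x)
--     i = n - 1
--     for j in range(n):
--         for k in range(n):
--             if (x[i] + x[j] + x[k]) % M == 0:
--                 return [1] * n
--
--     return [0] * n
-- ===== SOURCE B (Python) =====
-- M = 99
--
-- def causal_match3_true(x):
--     # O(n): hash the residues mod M once, then test each complement.
--     n = len(x)
--     if n == 0:
--         return []
--     residues = {v % M for v in x}
--     last = x[-1]
--     if any((-last - v) % M in residues for v in x):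
--         return [1] * n
--     return [0] * n
-- ===== Notes on version B (the rewrite author's own statement) =====
-- stated objective: faster
-- what changed: Replaced the O(n^2) double loop over all (j,k) index pairs by a single pass that builds a hash set of residues mod 99 once and tests each element's complement against it.
import Mathlib
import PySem

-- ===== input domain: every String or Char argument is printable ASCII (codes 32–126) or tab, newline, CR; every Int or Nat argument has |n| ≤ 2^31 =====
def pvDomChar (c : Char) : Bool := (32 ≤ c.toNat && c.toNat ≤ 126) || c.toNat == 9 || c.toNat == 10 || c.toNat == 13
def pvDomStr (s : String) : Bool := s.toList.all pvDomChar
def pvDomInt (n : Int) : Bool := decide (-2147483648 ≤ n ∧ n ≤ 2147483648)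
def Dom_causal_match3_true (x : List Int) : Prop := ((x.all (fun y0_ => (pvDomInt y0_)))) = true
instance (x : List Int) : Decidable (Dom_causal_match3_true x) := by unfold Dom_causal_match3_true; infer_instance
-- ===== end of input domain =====

-- B replaces A's O(n^2) double index loop by a one-pass complement lookup in a set of residues mod 99 (objective: faster).


-- ===== PORT A =====
-- x[i], x[j], x[k] are read only inside the loops, where the indices are in range,
-- so pyGetD with default 0 is exact (the default is never returned).
def causal_match3_true (x : List Int) : List Int :=
  let n : Int := x.length
  let i : Int := n - 1
  if (PySem.List.pyRange 0 n 1).any (fun j =>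
       (PySem.List.pyRange 0 n 1).any (fun k =>
         PySem.Int.mod (PySem.List.pyGetD x i 0 + PySem.List.pyGetD x j 0
           + PySem.List.pyGetD x k 0) 99 == 0))
  then List.replicate n.toNat 1
  else List.replicate n.toNat 0

-- ===== PORT B =====
def causal_match3_true_alt (x : List Int) : List Int :=
  if x = [] then []
  else
    let residues : PySem.Set Int := PySem.Set.ofList (x.map (fun v => PySem.Int.mod v 99))
    let last : Int := PySem.List.pyGetD x (-1) 0
    if x.any (fun v => PySem.Set.contains residues (PySem.Int.mod (-last - v) 99))
    then List.replicate x.length 1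
    else List.replicate x.length 0

-- ===== PRECONDITION & SPEC =====
def Spec_causal_match3_true (x : List Int) (out : List Int) : Prop := out = causal_match3_true_alt x
instance (x : List Int) (out : List Int) : Decidable (Spec_causal_match3_true x out) := by unfold Spec_causal_match3_true; infer_instance

-- ===== CLAIM (what is proved, stated in full; the proofs are below) =====
def Claim_equal_causal_match3_true : Prop := ∀ (x : List Int), Dom_causal_match3_true x → Spec_causal_match3_true x (causal_match3_true x)

-- ===== LEMMAS AND PROOFS =====

-- the arithmetic core: the triple sums to 0 mod 99 iff w's residue is the complement of last+v
lemma pv_mod_core (last v w : Int) :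
    PySem.Int.mod (last + v + w) 99 = 0 ↔
    PySem.Int.mod (-last - v) 99 = PySem.Int.mod w 99 := by
  rw [PySem.Int.mod_eq_emod_of_pos (by norm_num : (0:Int) < 99),
      PySem.Int.mod_eq_emod_of_pos (by norm_num : (0:Int) < 99),
      PySem.Int.mod_eq_emod_of_pos (by norm_num : (0:Int) < 99)]
  omega

-- both any-loops express the same existence of a pair of elements of x
lemma pv_conds_eq (x : List Int) (hx : x ≠ []) :
    ((PySem.List.pyRange 0 (x.length : Int) 1).any (fun j =>
       (PySem.List.pyRange 0 (x.length : Int) 1).any (fun k =>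
         PySem.Int.mod (PySem.List.pyGetD x ((x.length : Int) - 1) 0
           + PySem.List.pyGetD x j 0 + PySem.List.pyGetD x k 0) 99 == 0)))
    = x.any (fun v => PySem.Set.contains
        (PySem.Set.ofList (x.map (fun w => PySem.Int.mod w 99)))
        (PySem.Int.mod (-(PySem.List.pyGetD x (-1) 0) - v) 99)) := by
  have hlast : PySem.List.pyGetD x ((x.length : Int) - 1) 0 = PySem.List.pyGetD x (-1) 0 := by
    have hlen : 0 < x.length := List.length_pos_iff.mpr hx
    rw [PySem.List.pyGetD_neg_one x 0 hx,
        PySem.List.pyGetD_eq_getElem x 0 (by omega) (by omega),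
        List.getLast_eq_getElem]
    simp only [show ((x.length : Int) - 1).toNat = x.length - 1 by omega]
  set L := PySem.List.pyGetD x (-1) 0 with hL
  rw [hlast]
  rw [Bool.eq_iff_iff]
  simp only [List.any_eq_true, PySem.List.mem_pyRange_one, PySem.Set.contains,
    List.elem_iff, PySem.Set.mem_ofList, List.mem_map, beq_iff_eq]
  constructor
  · rintro ⟨j, ⟨hj0, hjn⟩, k, ⟨hk0, hkn⟩, h⟩
    refine ⟨x[j.toNat]'(by omega), List.getElem_mem _, x[k.toNat]'(by omega),
      List.getElem_mem _, ?_⟩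
    rw [PySem.List.pyGetD_eq_getElem x 0 hj0 hjn, PySem.List.pyGetD_eq_getElem x 0 hk0 hkn] at h
    exact ((pv_mod_core L _ _).mp h).symm
  · rintro ⟨v, hv, w, hw, h⟩
    obtain ⟨j, hj, hjv⟩ := List.mem_iff_getElem.mp hv
    obtain ⟨k, hk, hkw⟩ := List.mem_iff_getElem.mp hw
    refine ⟨(j : Int), ⟨by omega, by omega⟩, (k : Int), ⟨by omega, by omega⟩, ?_⟩
    rw [PySem.List.pyGetD_eq_getElem x 0 (by omega) (by omega),
        PySem.List.pyGetD_eq_getElem x 0 (by omega) (by omega)]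
    simp only [Int.toNat_natCast]
    rw [hjv, hkw]
    exact (pv_mod_core L v w).mpr h.symm

-- ===== VERDICT (by name: the statement is the Claim_ definition above) =====
theorem causal_match3_true_spec : Claim_equal_causal_match3_true := by
  intro x _
  unfold Spec_causal_match3_true causal_match3_true causal_match3_true_alt
  by_cases hx : x = []
  · subst hx; decide
  · simp only [if_neg hx]
    rw [pv_conds_eq x hx]
    simp [Int.toNat_natCast]
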